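-- pv_equiv track=rewrite | github.com/johnshiver/kaggle | lanl-earthquake/transformer.py | get_max_indices
-- ===== SOURCE A (Python) =====
-- def get_max_indices(earthquake_indices):
--     """
--     Get the maximum index of each contiguous segment of indices.
--
--     :param earthquake_indices: List of indices where time_to_failure is below the threshold
--     :return: List of maximum indices for each contiguous segment
--     """
--     if not earthquake_indices:
--         return []
--
--     max_indices = []
--     current_max = earthquake_indices[0]
--
--     for i in range(1, len(earthquake_indices)):
--         if earthquake_indices[i] != earthquake_indices[i - 1] + 1:
--             max_indices.append(current_max)
--             current_max = earthquake_indices[i]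
--         else:
--             current_max = earthquake_indices[i]
--
--     max_indices.append(current_max)
--     return max_indices
-- ===== SOURCE B (Python) =====
-- def get_max_indices(earthquake_indices):
--     """Group the indices into contiguous runs, then take the last element of each run."""
--     if not earthquake_indices:
--         return []
--     runs = [[earthquake_indices[0]]]
--     for x in earthquake_indices[1:]:
--         if x == runs[-1][-1] + 1:
--             runs[-1].append(x)
--         else:
--             runs.append([x])
--     return [run[-1] for run in runs]
-- ===== Notes on version B (the rewrite author's own statement) =====
-- stated objective: alternative
-- what changed: B materialises the contiguous runs as an explicit list of groups in one pass and then maps each group to its last element, instead of A's single stateful accumulator with a pending current_max.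
import Mathlib
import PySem

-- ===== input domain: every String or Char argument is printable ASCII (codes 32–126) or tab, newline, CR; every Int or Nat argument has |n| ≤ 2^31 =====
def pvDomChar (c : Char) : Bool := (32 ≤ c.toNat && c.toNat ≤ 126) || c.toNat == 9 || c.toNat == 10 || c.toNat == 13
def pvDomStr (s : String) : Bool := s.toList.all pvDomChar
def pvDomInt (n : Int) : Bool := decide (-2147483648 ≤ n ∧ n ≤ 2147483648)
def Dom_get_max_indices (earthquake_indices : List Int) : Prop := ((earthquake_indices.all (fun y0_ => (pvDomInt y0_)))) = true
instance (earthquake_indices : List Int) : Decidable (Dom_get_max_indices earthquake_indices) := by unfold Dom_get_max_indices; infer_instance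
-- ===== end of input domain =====

-- B groups the list into contiguous runs and maps each run to its last element; A keeps a single pending current_max.
-- Same values everywhere; objective: alternative decomposition.

-- ===== PORT A =====
def get_max_indices (earthquake_indices : List Int) : List Int :=
  if earthquake_indices = [] then []
  else
    let st := (PySem.List.pyRange 1 (earthquake_indices.length : Int) 1).foldl
      (fun (st : List Int × Int) i =>
        if PySem.List.pyGetD earthquake_indices i 0 ≠ PySem.List.pyGetD earthquake_indices (i - 1) 0 + 1 then
          (st.1 ++ [st.2], PySem.List.pyGetD earthquake_indices i 0)
        else
          (st.1, PySem.List.pyGetD earthquake_indices i 0))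
      ([], PySem.List.pyGetD earthquake_indices 0 0)
    st.1 ++ [st.2]

-- ===== PORT B =====
def get_max_indices_alt (earthquake_indices : List Int) : List Int :=
  match earthquake_indices with
  | [] => []
  | x0 :: rest =>
    let runs := rest.foldl
      (fun (runs : List (List Int)) x =>
        if x = (runs.getLastD []).getLastD 0 + 1 then
          runs.dropLast ++ [runs.getLastD [] ++ [x]]
        else
          runs ++ [[x]])
      [[x0]]
    runs.map (fun run => run.getLastD 0)

-- ===== PRECONDITION & SPEC =====
def Spec_get_max_indices (earthquake_indices : List Int) (out : List Int) : Prop := out = get_max_indices_alt earthquake_indices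
instance (earthquake_indices : List Int) (out : List Int) : Decidable (Spec_get_max_indices earthquake_indices out) := by unfold Spec_get_max_indices; infer_instance

-- ===== CLAIM (what is proved, stated in full; the proofs are below) =====
def Claim_equal_get_max_indices : Prop := ∀ (earthquake_indices : List Int), Dom_get_max_indices earthquake_indices → Spec_get_max_indices earthquake_indices (get_max_indices earthquake_indices)

-- ===== LEMMAS AND PROOFS =====

-- reference characterisation: last element of each contiguous run, given the previous element `cur`
def lastRuns (cur : Int) : List Int → List Int
  | [] => [cur]
  | x :: rest => if x ≠ cur + 1 then cur :: lastRuns x rest else lastRuns x rest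

theorem foldA_gen (xs : List Int) : ∀ (tl : List Int) (j : Int) (maxs : List Int) (cur : Int),
    1 ≤ j → xs.drop j.toNat = tl → cur = PySem.List.pyGetD xs (j - 1) 0 →
    (let st := (PySem.List.pyRange j (xs.length : Int) 1).foldl
      (fun (st : List Int × Int) i =>
        if PySem.List.pyGetD xs i 0 ≠ PySem.List.pyGetD xs (i - 1) 0 + 1 then
          (st.1 ++ [st.2], PySem.List.pyGetD xs i 0)
        else
          (st.1, PySem.List.pyGetD xs i 0))
      (maxs, cur)
     ; st.1 ++ [st.2]) = maxs ++ lastRuns cur tl := by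
  intro tl
  induction tl with
  | nil =>
    intro j maxs cur hj hdrop hcur
    have hlen : xs.length ≤ j.toNat := by
      by_contra h
      push Not at h
      have := List.drop_eq_nil_iff.mp hdrop
      omega
    have hjlen : (xs.length : Int) ≤ j := by omega
    rw [PySem.List.pyRange_one_eq_nil hjlen]
    simp [lastRuns]
  | cons x tl' ih =>
    intro j maxs cur hj hdrop hcur
    have h0j : 0 ≤ j := by omega
    have hjl : j.toNat < xs.length := by
      by_contra h
      push Not at h
      rw [List.drop_eq_nil_iff.mpr h] at hdrop
      simp at hdrop
    have hjI : j < (xs.length : Int) := by omega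
    have hx : xs[j.toNat] = x := by
      have := hdrop
      have h1 : xs.drop j.toNat = xs[j.toNat] :: xs.drop (j.toNat + 1) :=
        List.drop_eq_getElem_cons hjl
      rw [h1] at this
      exact (List.cons.injEq _ _ _ _ ▸ this).1
    have hgj : PySem.List.pyGetD xs j 0 = x := by
      rw [PySem.List.pyGetD_of_nonneg xs 0 h0j]
      simp [List.getD_eq_getElem?_getD, hjl, hx]
    have hdrop' : xs.drop (j + 1).toNat = tl' := by
      have h1 : xs.drop j.toNat = xs[j.toNat] :: xs.drop (j.toNat + 1) :=
        List.drop_eq_getElem_cons hjl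
      rw [h1] at hdrop
      have : (j + 1).toNat = j.toNat + 1 := by omega
      rw [this]
      exact (List.cons.injEq _ _ _ _ ▸ hdrop).2
    rw [PySem.List.pyRange_one_cons hjI]
    simp only [List.foldl_cons]
    have hprev : PySem.List.pyGetD xs (j - 1) 0 = cur := hcur.symm
    by_cases hc : x = cur + 1
    · have : ¬ (PySem.List.pyGetD xs j 0 ≠ PySem.List.pyGetD xs (j - 1) 0 + 1) := by
        rw [hgj, hprev]; simp [hc]
      rw [if_neg this]
      have := ih (j + 1) maxs x (by omega) hdrop' (by simp [hgj])
      simp only at this ⊢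
      rw [hgj, this]
      simp [lastRuns, hc]
    · have : (PySem.List.pyGetD xs j 0 ≠ PySem.List.pyGetD xs (j - 1) 0 + 1) := by
        rw [hgj, hprev]; exact hc
      rw [if_pos this]
      have := ih (j + 1) (maxs ++ [cur]) x (by omega) hdrop' (by simp [hgj])
      simp only at this ⊢
      rw [hgj, this]
      simp [lastRuns, hc]

theorem A_eq_lastRuns (x0 : Int) (rest : List Int) :
    get_max_indices (x0 :: rest) = lastRuns x0 rest := by
  unfold get_max_indices
  rw [if_neg (by simp)]
  have h0 : PySem.List.pyGetD (x0 :: rest) 0 0 = x0 := by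
    rw [PySem.List.pyGetD_of_nonneg (x0 :: rest) 0 (by omega)]
    simp
  have := foldA_gen (x0 :: rest) rest 1 [] (PySem.List.pyGetD (x0 :: rest) 0 0)
    (le_refl 1) (by simp) (by norm_num)
  simp only at this
  rw [this, h0]
  simp

theorem foldB_gen : ∀ (rest : List Int) (rs : List (List Int)) (r : List Int) (cur : Int),
    r.getLastD 0 = cur →
    ((rest.foldl
      (fun (runs : List (List Int)) x =>
        if x = (runs.getLastD []).getLastD 0 + 1 then
          runs.dropLast ++ [runs.getLastD [] ++ [x]]
        else
          runs ++ [[x]])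
      (rs ++ [r])).map (fun run => run.getLastD 0))
      = rs.map (fun run => run.getLastD 0) ++ lastRuns cur rest := by
  intro rest
  induction rest with
  | nil =>
    intro rs r cur hcur
    rw [List.getLastD_eq_getLast?] at hcur
    simp [lastRuns, hcur]
  | cons x rest' ih =>
    intro rs r cur hcur
    have hlast : (rs ++ [r]).getLastD [] = r := by simp
    have hdrop : (rs ++ [r]).dropLast = rs := by simp
    simp only [List.foldl_cons, hlast]
    by_cases hc : x = cur + 1
    · rw [if_pos (by rw [hcur]; exact hc), hdrop]
      have := ih rs (r ++ [x]) x (by simp)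
      rw [this]
      simp [lastRuns, hc]
    · rw [if_neg (by rw [hcur]; exact hc)]
      have h2 : rs ++ [r] ++ [[x]] = (rs ++ [r]) ++ [[x]] := by simp
      rw [h2]
      have := ih (rs ++ [r]) [x] x (by simp)
      rw [this]
      rw [List.getLastD_eq_getLast?] at hcur
      simp [lastRuns, hc, hcur]

theorem B_eq_lastRuns (x0 : Int) (rest : List Int) :
    get_max_indices_alt (x0 :: rest) = lastRuns x0 rest := by
  unfold get_max_indices_alt
  simp only
  have := foldB_gen rest [] [x0] x0 (by simp)
  simp only [List.nil_append, List.map_nil] at this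
  rw [this]

-- ===== VERDICT (by name: the statement is the Claim_ definition above) =====
theorem get_max_indices_spec : Claim_equal_get_max_indices := by
  unfold Claim_equal_get_max_indices
  intro xs _
  unfold Spec_get_max_indices
  cases xs with
  | nil => rfl
  | cons x0 rest => rw [A_eq_lastRuns, B_eq_lastRuns]
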